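-- pv_equiv track=rewrite | github.com/wwj10/Wave-zeros | GA20240627_2.py | count_zeros_until_one
-- ===== SOURCE A (Python) =====
-- def count_zeros_until_one(xor_results):
--     count_zeros = 0
--     found_one = False
--     for bit in xor_results:
--         if bit == '0' and not found_one:
--             count_zeros += 1
--         elif bit == '1':
--             break
--     return count_zeros
-- ===== SOURCE B (Python) =====
-- def count_zeros_until_one(xor_results):
--     idx = xor_results.find('1')
--     prefix = xor_results if idx == -1 else xor_results[:idx]
--     return prefix.count('0')
-- ===== Notes on version B (the rewrite author's own statement) =====
-- stated objective: faster
-- what changed: Instead of one element-by-element scan with a zero-counter and a break, B locates the first one-bit with str.find, slices the string before it, and counts the zero-bits in that slice with str.count.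
import Mathlib
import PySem

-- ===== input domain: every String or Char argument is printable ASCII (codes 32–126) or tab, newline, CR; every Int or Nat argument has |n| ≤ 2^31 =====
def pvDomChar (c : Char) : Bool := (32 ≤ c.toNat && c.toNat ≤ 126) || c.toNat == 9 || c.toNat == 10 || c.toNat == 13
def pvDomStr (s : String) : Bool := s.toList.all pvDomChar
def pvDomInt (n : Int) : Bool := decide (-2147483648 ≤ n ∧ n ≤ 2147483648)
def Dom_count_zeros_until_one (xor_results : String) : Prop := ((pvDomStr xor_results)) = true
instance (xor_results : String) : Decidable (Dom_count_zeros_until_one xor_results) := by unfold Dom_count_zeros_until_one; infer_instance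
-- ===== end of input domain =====

-- B replaces A's counting scan-with-break by string primitives: find the first one-bit, slice before it, count zero-bits in the slice (same O(n), measured faster via C-level str.find/str.count).

-- ===== PORT A =====
-- literal port of A's loop: accumulator (count_zeros, found_one), early break on '1'
def countZerosLoopA : List Char → Int → Bool → Int
  | [], count_zeros, _ => count_zeros
  | bit :: rest, count_zeros, found_one =>
    if bit = '0' ∧ ¬ found_one then
      countZerosLoopA rest (count_zeros + 1) found_one
    else if bit = '1' then
      count_zeros
    else
      countZerosLoopA rest count_zeros found_one

def count_zeros_until_one (xor_results : String) : Int :=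
  countZerosLoopA xor_results.toList 0 false

-- ===== PORT B =====
def count_zeros_until_one_alt (xor_results : String) : Int :=
  let idx := PySem.Str.find xor_results "1"
  let pre := if idx = -1 then xor_results else PySem.Str.slice xor_results none (some idx)
  (PySem.Str.count pre "0" : Int)

-- ===== PRECONDITION & SPEC =====
def Spec_count_zeros_until_one (xor_results : String) (out : Int) : Prop := out = count_zeros_until_one_alt xor_results
instance (xor_results : String) (out : Int) : Decidable (Spec_count_zeros_until_one xor_results out) := by unfold Spec_count_zeros_until_one; infer_instance

-- ===== CLAIM (what is proved, stated in full; the proofs are below) =====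
def Claim_equal_count_zeros_until_one : Prop := ∀ (xor_results : String), Dom_count_zeros_until_one xor_results → Spec_count_zeros_until_one xor_results (count_zeros_until_one xor_results)

-- ===== LEMMAS AND PROOFS =====

-- A's loop (with found_one still false) counts the '0's of the prefix before the first '1'
theorem countZerosLoopA_eq (l : List Char) (acc : Int) :
    countZerosLoopA l acc false = acc + ((l.takeWhile (fun b => b ≠ '1')).count '0' : Int) := by
  induction l generalizing acc with
  | nil => simp [countZerosLoopA]
  | cons bit rest ih =>
    by_cases h0 : bit = '0'
    · simp [countZerosLoopA, h0, List.takeWhile, ih]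
      ring
    · by_cases h1 : bit = '1'
      · simp [countZerosLoopA, h1, List.takeWhile]
      · simp [countZerosLoopA, h0, h1, List.takeWhile, ih]

-- Chars.count with a single-character needle is List.count
theorem countGo_singleton (c : Char) (fuel : Nat) (l : List Char) (acc : Nat)
    (h : l.length ≤ fuel) :
    PySem.Chars.count.go [c] fuel l acc = acc + l.count c := by
  induction fuel generalizing l acc with
  | zero =>
    have : l = [] := List.length_eq_zero_iff.mp (Nat.le_zero.mp h)
    subst this; simp [PySem.Chars.count.go]
  | succ n ih =>
    cases l with
    | nil => simp [PySem.Chars.count.go]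
    | cons x t =>
      by_cases hx : x = c
      · have hp : List.isPrefixOf [c] (x :: t) = true := by
          simp [List.isPrefixOf, hx]
        simp only [PySem.Chars.count.go, hp, if_pos]
        simp only [List.length_cons] at h
        rw [show List.drop (List.length [c]) (x :: t) = t by simp]
        rw [ih t (acc + 1) (by omega)]
        simp [hx]
        omega
      · have hp : List.isPrefixOf [c] (x :: t) = false := by
          simp [List.isPrefixOf]; exact fun hh => (hx hh.symm).elim
        simp only [PySem.Chars.count.go, hp]
        simp only [List.length_cons] at h
        rw [ih t acc (by omega)]
        simp [hx]

theorem charsCount_singleton (l : List Char) (c : Char) :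
    PySem.Chars.count l [c] = l.count c := by
  simp [PySem.Chars.count, countGo_singleton c l.length l 0 le_rfl]

-- [c] is a prefix of xs iff xs starts with c
theorem singleton_prefix_iff (c : Char) (xs : List Char) :
    [c] <+: xs ↔ xs.head? = some c := by
  cases xs with
  | nil => simp
  | cons y t =>
    constructor
    · rintro ⟨u, hu⟩
      simp at hu
      simp [hu.1]
    · intro h
      simp at h
      exact ⟨t, by simp [h]⟩

-- if the first n elements differ from c and the n-th is c, takeWhile (≠ c) is take n
theorem takeWhile_eq_take_of_first (c : Char) (l : List Char) (n : Nat)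
    (hn : l[n]? = some c) (hmin : ∀ i < n, l[i]? ≠ some c) :
    l.takeWhile (fun b => b ≠ c) = l.take n := by
  induction l generalizing n with
  | nil => simp at hn
  | cons x t ih =>
    cases n with
    | zero =>
      simp at hn
      simp [List.takeWhile, hn]
    | succ m =>
      have hx : x ≠ c := by
        have := hmin 0 (Nat.succ_pos m)
        simpa using this
      simp only [List.getElem?_cons_succ] at hn
      have hmin' : ∀ i < m, t[i]? ≠ some c := by
        intro i hi
        have := hmin (i + 1) (by omega)
        simpa using this
      rw [List.takeWhile_cons_of_pos (by simp [hx]), ih m hn hmin']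
      rfl

-- if c does not occur, takeWhile (≠ c) is the whole list
theorem takeWhile_eq_self_of_not_mem (c : Char) (l : List Char) (h : c ∉ l) :
    l.takeWhile (fun b => b ≠ c) = l := by
  apply List.takeWhile_eq_self_iff.mpr
  intro x hx
  simp
  intro he; exact h (he ▸ hx)

-- [c] <:+: l iff c ∈ l
theorem singleton_infix_iff_mem (c : Char) (l : List Char) :
    [c] <:+: l ↔ c ∈ l := by
  constructor
  · intro h
    exact h.mem (by simp)
  · intro h
    obtain ⟨a, b, hab⟩ := List.mem_iff_append.mp h
    exact ⟨a, b, by simp [hab]⟩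

-- ===== VERDICT (by name: the statement is the Claim_ definition above) =====
theorem count_zeros_until_one_spec : Claim_equal_count_zeros_until_one := by
  intro s _
  show _ = _
  unfold count_zeros_until_one count_zeros_until_one_alt
  rw [countZerosLoopA_eq]
  by_cases hmem : '1' ∈ s.toList
  · -- find succeeds
    have hfind : PySem.Str.find s "1" ≠ -1 := by
      rw [PySem.Str.find_ne_neg_one_iff]
      simpa [singleton_infix_iff_mem] using hmem
    have hnonneg : 0 ≤ PySem.Str.find s "1" := by
      rw [PySem.Str.find_nonneg_iff]
      simpa [singleton_infix_iff_mem] using hmem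
    set n := (PySem.Str.find s "1").toNat with hn
    have hspec := PySem.Chars.find_spec (s := s.toList) (sub := ['1']) (by simpa [PySem.Str.find] using hnonneg)
    have hget : s.toList[n]? = some '1' := by
      have := (singleton_prefix_iff '1' (s.toList.drop ((PySem.Chars.find s.toList ['1']).toNat))).mp hspec.1
      simpa [List.head?_drop, hn, PySem.Str.find] using this
    have hmin : ∀ i < n, s.toList[i]? ≠ some '1' := by
      intro i hi hc
      exact hspec.2 i (by simpa [hn, PySem.Str.find] using hi)
        ((singleton_prefix_iff '1' (s.toList.drop i)).mpr (by simpa [List.head?_drop] using hc))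
    rw [takeWhile_eq_take_of_first '1' s.toList n hget hmin]
    simp only [if_neg hfind]
    rw [PySem.Str.count, PySem.Str.toList_slice, PySem.Chars.slice_eq_listSlice,
      PySem.List.slice_to _ hnonneg,
      show ("0" : String).toList = ['0'] from rfl, charsCount_singleton]
    simp [hn]
  · -- find = -1
    have hfind : PySem.Str.find s "1" = -1 := by
      rw [PySem.Str.find_eq_neg_one_iff]
      simpa [singleton_infix_iff_mem] using hmem
    simp only [hfind, if_pos]
    rw [takeWhile_eq_self_of_not_mem _ _ hmem]
    simp [PySem.Str.count, charsCount_singleton]
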